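-- pv_equiv track=rewrite | github.com/poudelsaroj/mcq_generator_final | mcq_generator.py | _is_minimal_variation
-- ===== SOURCE A (Python) =====
-- from typing import Dict, Any, List, Tuple
--
-- def _is_minimal_variation(candidate: str, existing_items: List[str]) -> bool:
--     """Check if candidate is just a minimal variation of existing items."""
--     for item in existing_items:
--         # Check if edit distance is very small
--         if abs(len(item) - len(candidate)) <= 2:
--             # Simple check for differing by just one character
--             if len(item) == len(candidate):
--                 diff_chars = sum(1 for a, b in zip(item.lower(), candidate.lower()) if a != b)
--                 if diff_chars <= 2:  # Differs by at most 2 chars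
--                     return True
--
--             # If they're almost the same length, it's likely just a minimal difference
--             len_diff = abs(len(item) - len(candidate))
--             if len_diff <= 3:  # Only small differences like "a" or "the" or "s"
--                 return True
--
--     return False
-- ===== SOURCE B (Python) =====
-- def _is_minimal_variation(candidate, existing_items):
--     """Check if candidate is just a minimal variation of existing items."""
--     lengths = {len(item) for item in existing_items}
--     n = len(candidate)
--     return any((n + d) in lengths for d in range(-2, 3))
-- ===== Notes on version B (the rewrite author's own statement) =====
-- stated objective: simpler
-- what changed: A's per-item loop (with a dead character-diff computation whose result never affects the answer, since the unconditional len_diff<=3 check already fires whenever the outer len-diff<=2 guard holds) is replaced by building a set of item lengths once and probing the five lengths len(candidate)-2..len(candidate)+2 against it.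
import Mathlib
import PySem

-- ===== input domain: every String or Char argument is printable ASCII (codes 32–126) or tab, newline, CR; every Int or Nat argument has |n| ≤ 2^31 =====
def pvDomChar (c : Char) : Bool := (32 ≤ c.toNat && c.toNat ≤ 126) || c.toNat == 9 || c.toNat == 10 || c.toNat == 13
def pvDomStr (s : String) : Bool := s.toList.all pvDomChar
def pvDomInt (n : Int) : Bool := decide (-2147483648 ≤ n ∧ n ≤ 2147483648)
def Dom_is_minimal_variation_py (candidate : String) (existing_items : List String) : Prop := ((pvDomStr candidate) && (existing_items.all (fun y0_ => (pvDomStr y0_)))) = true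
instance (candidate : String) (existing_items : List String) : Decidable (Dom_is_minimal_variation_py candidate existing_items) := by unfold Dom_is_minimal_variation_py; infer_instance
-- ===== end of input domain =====

-- B replaces A's per-item scan (with its dead char-diff work) by a length-set built once and five membership probes; objective: simpler.
-- ===== PORT A =====
def imvGo (candidate : String) : List String → Bool
  | [] => false
  | item :: rest =>
    if |(item.length : Int) - (candidate.length : Int)| ≤ 2 then
      if item.length = candidate.length ∧
          (((PySem.Str.lower item).toList.zip (PySem.Str.lower candidate).toList).countP
            (fun p => p.1 != p.2)) ≤ 2 then true
      else
        -- len_diff = abs(len(item) - len(candidate)); if len_diff <= 3: return True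
        if |(item.length : Int) - (candidate.length : Int)| ≤ 3 then true
        else imvGo candidate rest
    else imvGo candidate rest

def is_minimal_variation_py (candidate : String) (existing_items : List String) : Bool :=
  imvGo candidate existing_items

-- ===== PORT B =====
def is_minimal_variation_py_alt (candidate : String) (existing_items : List String) : Bool :=
  let lengths : PySem.Set Int := PySem.Set.ofList (existing_items.map (fun item => (item.length : Int)))
  let n : Int := candidate.length
  (PySem.List.pyRange (-2) 3 1).any (fun d => PySem.Set.contains lengths (n + d))

-- ===== PRECONDITION & SPEC =====
def Spec_is_minimal_variation_py (candidate : String) (existing_items : List String) (out : Bool) : Prop := out = is_minimal_variation_py_alt candidate existing_items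
instance (candidate : String) (existing_items : List String) (out : Bool) : Decidable (Spec_is_minimal_variation_py candidate existing_items out) := by unfold Spec_is_minimal_variation_py; infer_instance

-- ===== CLAIM (what is proved, stated in full; the proofs are below) =====
def Claim_equal_is_minimal_variation_py : Prop := ∀ (candidate : String) (existing_items : List String), Dom_is_minimal_variation_py candidate existing_items → Spec_is_minimal_variation_py candidate existing_items (is_minimal_variation_py candidate existing_items)

-- ===== LEMMAS AND PROOFS =====

-- ===== VERDICT (by name: the statement is the Claim_ definition above) =====
lemma imvGo_eq_any (c : String) (l : List String) :
    imvGo c l = l.any (fun item => decide (|(item.length : Int) - (c.length : Int)| ≤ 2)) := by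
  induction l with
  | nil => rfl
  | cons item rest ih =>
    rw [imvGo, List.any_cons]
    split_ifs with h1 h2 h3 <;> simp_all <;> try omega
    

lemma alt_eq_any (c : String) (l : List String) :
    is_minimal_variation_py_alt c l
      = l.any (fun item => decide (|(item.length : Int) - (c.length : Int)| ≤ 2)) := by
  unfold is_minimal_variation_py_alt
  have hr : PySem.List.pyRange (-2) 3 1 = [-2, -1, 0, 1, 2] := by decide
  rw [Bool.eq_iff_iff, hr]
  simp only [List.any_cons, List.any_nil, Bool.or_eq_true, Bool.false_eq_true, or_false,
    List.any_eq_true, PySem.Set.contains_iff, PySem.Set.mem_ofList, List.mem_map,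
    decide_eq_true_eq]
  constructor
  · rintro (⟨item, hmem, heq⟩ | ⟨item, hmem, heq⟩ | ⟨item, hmem, heq⟩ |
        ⟨item, hmem, heq⟩ | ⟨item, hmem, heq⟩) <;>
      exact ⟨item, hmem, by rw [abs_le]; omega⟩
  · rintro ⟨item, hmem, h⟩
    rw [abs_le] at h
    have hcase : (item.length : Int) = (c.length : Int) + -2 ∨
        (item.length : Int) = (c.length : Int) + -1 ∨
        (item.length : Int) = (c.length : Int) + 0 ∨
        (item.length : Int) = (c.length : Int) + 1 ∨
        (item.length : Int) = (c.length : Int) + 2 := by omega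
    rcases hcase with h' | h' | h' | h' | h' <;>
      first
      | exact Or.inl ⟨item, hmem, h'⟩
      | exact Or.inr (Or.inl ⟨item, hmem, h'⟩)
      | exact Or.inr (Or.inr (Or.inl ⟨item, hmem, h'⟩))
      | exact Or.inr (Or.inr (Or.inr (Or.inl ⟨item, hmem, h'⟩)))
      | exact Or.inr (Or.inr (Or.inr (Or.inr ⟨item, hmem, h'⟩)))

theorem is_minimal_variation_py_spec : Claim_equal_is_minimal_variation_py := by
  intro candidate existing_items _
  unfold Spec_is_minimal_variation_py is_minimal_variation_py
  rw [imvGo_eq_any, alt_eq_any]
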